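-- pv_equiv track=rewrite | github.com/ebaumeis/labscripts | allOHGQDtopgen.py | index_generator
-- ===== SOURCE A (Python) =====
-- def index_generator(number_of_rings):
--   counter = 0
--   rings = []
--   for x in range(0,number_of_rings+1):
--     numbers = []
--     for y in range(1,6+x*12+1):
--       counter = counter + 1
--       numbers.append(str(counter))
--     rings.append(numbers)
--   rings.append(['O%d' % x for x in range(1,(number_of_rings+1)*6)])
--   rings.append(['H%d' % x for x in range(1,(number_of_rings+1)*6)])
--   return rings
-- ===== SOURCE B (Python) =====
-- def index_generator(number_of_rings):
--     # ring x starts at 6*x*x + 1 and has 6 + 12*x entries, so its values are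
--     # exactly range(6*x*x + 1, 6*(x+1)*(x+1) + 1); no running counter needed.
--     rings = [[str(i) for i in range(6 * x * x + 1, 6 * (x + 1) * (x + 1) + 1)]
--              for x in range(number_of_rings + 1)]
--     rings.append(['O%d' % x for x in range(1, (number_of_rings + 1) * 6)])
--     rings.append(['H%d' % x for x in range(1, (number_of_rings + 1) * 6)])
--     return rings
-- ===== Notes on version B (the rewrite author's own statement) =====
-- stated objective: simpler
-- what changed: Replaces the counter threaded through the nested loops by a closed-form per-ring range (ring x = range(6*x*x+1, 6*(x+1)*(x+1)+1)), building each ring independently in a comprehension.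
import Mathlib
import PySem

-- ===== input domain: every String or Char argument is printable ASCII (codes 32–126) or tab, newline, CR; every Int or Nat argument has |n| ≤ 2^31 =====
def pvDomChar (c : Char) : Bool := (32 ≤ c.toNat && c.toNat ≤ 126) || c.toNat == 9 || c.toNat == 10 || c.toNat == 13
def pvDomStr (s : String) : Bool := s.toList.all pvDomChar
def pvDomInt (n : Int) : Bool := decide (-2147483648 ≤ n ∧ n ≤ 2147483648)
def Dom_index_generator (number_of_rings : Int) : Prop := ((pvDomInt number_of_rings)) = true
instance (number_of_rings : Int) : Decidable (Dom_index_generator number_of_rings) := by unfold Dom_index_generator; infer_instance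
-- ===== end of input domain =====

-- B drops A's threaded counter: each ring x is the closed-form range 6*x*x+1 .. 6*(x+1)*(x+1); same output, simpler.

-- ===== PORT A =====
-- inner loop body: counter += 1; numbers.append(str(counter))
def pvInnerA (st : Int × List String) (_y : Int) : Int × List String :=
  (st.1 + 1, st.2 ++ [PySem.Int.toStr (st.1 + 1)])

-- outer loop body over x
def pvStepA (st : Int × List (List String)) (x : Int) : Int × List (List String) :=
  let inner := (PySem.List.pyRange 1 (6 + x * 12 + 1) 1).foldl pvInnerA (st.1, [])
  (inner.1, st.2 ++ [inner.2])

def index_generator (number_of_rings : Int) : List (List String) :=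
  let res := (PySem.List.pyRange 0 (number_of_rings + 1) 1).foldl pvStepA (0, [])
  res.2
    ++ [(PySem.List.pyRange 1 ((number_of_rings + 1) * 6) 1).map
          (fun x => String.ofList ('O' :: PySem.Int.toChars x))]
    ++ [(PySem.List.pyRange 1 ((number_of_rings + 1) * 6) 1).map
          (fun x => String.ofList ('H' :: PySem.Int.toChars x))]

-- ===== PORT B =====
def pvRingB (x : Int) : List String :=
  (PySem.List.pyRange (6 * x * x + 1) (6 * (x + 1) * (x + 1) + 1) 1).map PySem.Int.toStr

def index_generator_alt (number_of_rings : Int) : List (List String) :=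
  (PySem.List.pyRange 0 (number_of_rings + 1) 1).map pvRingB
    ++ [(PySem.List.pyRange 1 ((number_of_rings + 1) * 6) 1).map
          (fun x => String.ofList ('O' :: PySem.Int.toChars x))]
    ++ [(PySem.List.pyRange 1 ((number_of_rings + 1) * 6) 1).map
          (fun x => String.ofList ('H' :: PySem.Int.toChars x))]

-- ===== PRECONDITION & SPEC =====
def Spec_index_generator (number_of_rings : Int) (out : List (List String)) : Prop := out = index_generator_alt number_of_rings
instance (number_of_rings : Int) (out : List (List String)) : Decidable (Spec_index_generator number_of_rings out) := by unfold Spec_index_generator; infer_instance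

-- ===== CLAIM (what is proved, stated in full; the proofs are below) =====
def Claim_equal_index_generator : Prop := ∀ (number_of_rings : Int), Dom_index_generator number_of_rings → Spec_index_generator number_of_rings (index_generator number_of_rings)

-- ===== LEMMAS AND PROOFS =====

-- the inner loop ignores its element: starting at counter c it appends str(c+1)..str(c+len)
theorem pvInnerA_foldl (l : List Int) : ∀ (c : Int) (ns : List String),
    l.foldl pvInnerA (c, ns)
      = (c + l.length, ns ++ (PySem.List.pyRange (c + 1) (c + 1 + l.length) 1).map PySem.Int.toStr) := by
  induction l with
  | nil => intro c ns; simp [PySem.List.pyRange_one_eq_nil]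
  | cons a t ih =>
    intro c ns
    simp only [List.foldl_cons, pvInnerA, ih, List.length_cons, Prod.mk.injEq]
    refine ⟨by push_cast; ring, ?_⟩
    rw [PySem.List.pyRange_one_cons (a := c + 1) (by push_cast; omega)]
    simp only [List.map_cons, List.append_assoc, List.singleton_append]
    congr 3
    push_cast; ring

-- outer loop invariant: after processing rings m..m+k-1 the counter is 6*(m+k)^2 and the
-- rings accumulated are exactly the closed-form rings of B
theorem pvStepA_foldl (k : Nat) : ∀ (m : Int) (rs : List (List String)), 0 ≤ m →
    (PySem.List.pyRange m (m + k) 1).foldl pvStepA (6 * m * m, rs)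
      = (6 * (m + k) * (m + k), rs ++ (PySem.List.pyRange m (m + k) 1).map pvRingB) := by
  induction k with
  | zero => intro m rs _; simp [PySem.List.pyRange_one_eq_nil]
  | succ k ih =>
    intro m rs hm
    rw [PySem.List.pyRange_one_cons (by push_cast; omega)]
    simp only [List.foldl_cons, List.map_cons]
    have hstep : pvStepA (6 * m * m, rs) m
        = (6 * (m + 1) * (m + 1), rs ++ [pvRingB m]) := by
      have hlen : ((PySem.List.pyRange 1 (6 + m * 12 + 1) 1).length : Int) = 6 + m * 12 := by
        rw [PySem.List.length_pyRange_one]; omega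
      simp only [pvStepA, pvInnerA_foldl, List.nil_append, hlen, pvRingB, Prod.mk.injEq]
      have e1 : (6 * m * m + (6 + m * 12) : Int) = 6 * (m + 1) * (m + 1) := by ring
      have e2 : (6 * m * m + 1 + (6 + m * 12) : Int) = 6 * (m + 1) * (m + 1) + 1 := by ring
      rw [e1, e2]
      exact ⟨rfl, rfl⟩
    rw [hstep]
    have h1 : m + (k + 1 : Nat) = (m + 1) + (k : Nat) := by push_cast; ring
    rw [h1, ih (m + 1) (rs ++ [pvRingB m]) (by omega)]
    simp

theorem index_generator_eq (n : Int) : index_generator n = index_generator_alt n := by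
  unfold index_generator index_generator_alt
  by_cases h : n + 1 ≤ 0
  · rw [PySem.List.pyRange_one_eq_nil h]; simp
  · have h : 0 < n + 1 := by omega
    have hk : n + 1 = ((0 : Int) + ((n + 1).toNat : Nat)) := by omega
    rw [hk]
    have hh := pvStepA_foldl (n + 1).toNat 0 [] le_rfl
    simp only [mul_zero] at hh
    rw [hh]
    simp

-- ===== VERDICT (by name: the statement is the Claim_ definition above) =====
theorem index_generator_spec : Claim_equal_index_generator := by
  intro n _
  exact index_generator_eq n
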